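-- pv_equiv track=rewrite | github.com/Eriumsss/wwiseRE | HashCracking/scripts/brute_force_advanced.py | generate_with_roman
-- ===== SOURCE A (Python) =====
-- from typing import Set, Dict, List, Tuple, Optional
--
-- def to_roman(n: int) -> str:
--     """Convert integer to lowercase Roman numeral (1-20)."""
--     if n < 1 or n > 20:
--         return str(n)
--     numerals = ['', 'i', 'ii', 'iii', 'iv', 'v', 'vi', 'vii', 'viii', 'ix', 'x',
--                 'xi', 'xii', 'xiii', 'xiv', 'xv', 'xvi', 'xvii', 'xviii', 'xix', 'xx']
--     return numerals[n]
--
-- def generate_with_roman(word: str, max_n: int = 10) -> List[str]: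
--     """Generate Roman numeral variants: word_i, word_ii, word_iii, etc."""
--     results = []
--     for i in range(1, max_n + 1):
--         roman = to_roman(i)
--         results.extend([
--             f"{word}_{roman}",      # word_i
--             f"{word}{roman}",       # wordi (less common)
--         ])
--     return results
-- ===== SOURCE B (Python) =====
-- def to_roman(n: int) -> str:
--     """Convert integer to lowercase Roman numeral (1-20) by greedy subtraction."""
--     if n < 1 or n > 20:
--         return str(n)
--     out = []
--     for value, sym in [(10, 'x'), (9, 'ix'), (5, 'v'), (4, 'iv'), (1, 'i')]:
--         while n >= value:
--             n -= value
--             out.append(sym)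
--     return ''.join(out)
--
-- def generate_with_roman(word: str, max_n: int = 10) -> list:
--     """Generate Roman numeral variants via a flat comprehension."""
--     return [v
--             for i in range(1, max_n + 1)
--             for v in (f"{word}_{to_roman(i)}", f"{word}{to_roman(i)}")]
-- ===== Notes on version B (the rewrite author's own statement) =====
-- stated objective: idiomatic
-- what changed: to_roman now computes the numeral by greedy subtraction over value/symbol pairs instead of indexing a 21-entry precomputed table, and the outer loop becomes a flat comprehension instead of extend on an accumulator.
import Mathlib
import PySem

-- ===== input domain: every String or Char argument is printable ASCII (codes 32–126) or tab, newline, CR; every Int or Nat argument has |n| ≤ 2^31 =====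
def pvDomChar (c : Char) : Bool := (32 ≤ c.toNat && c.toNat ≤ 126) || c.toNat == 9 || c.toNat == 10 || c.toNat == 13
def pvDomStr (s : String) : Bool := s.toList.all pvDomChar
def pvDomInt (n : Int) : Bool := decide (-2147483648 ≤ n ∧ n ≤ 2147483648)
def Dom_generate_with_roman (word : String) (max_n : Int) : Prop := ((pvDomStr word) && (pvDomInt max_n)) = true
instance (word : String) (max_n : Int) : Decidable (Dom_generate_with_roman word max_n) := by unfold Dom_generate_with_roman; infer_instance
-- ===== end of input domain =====

-- B replaces the table-lookup to_roman by a greedy subtractive build and the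
-- accumulator loop by a flat comprehension (objective: idiomatic).

-- ===== PORT A =====
-- to_roman: guard, then index the precomputed table (index 1..20, in range by the guard, so the default is unused)
def to_roman (n : Int) : String :=
  if n < 1 ∨ n > 20 then PySem.Int.toStr n
  else
    let numerals := ["", "i", "ii", "iii", "iv", "v", "vi", "vii", "viii", "ix", "x",
                     "xi", "xii", "xiii", "xiv", "xv", "xvi", "xvii", "xviii", "xix", "xx"]
    PySem.List.pyGetD numerals n ""

def generate_with_roman (word : String) (max_n : Int) : List String :=
  (PySem.List.pyRange 1 (max_n + 1) 1).foldl
    (fun results i =>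
      let roman := to_roman i
      results ++ [word ++ "_" ++ roman, word ++ roman])
    []

-- ===== PORT B =====
-- the while loop 'while n >= value: n -= value; out.append(sym)'; the fuel bounds
-- the iteration count (value ≥ 1 and n ≤ fuel at every call), it changes no value
def romanWhile (value : Int) (sym : String) : Nat → Int → List String → Int × List String
  | 0, n, out => (n, out)
  | fuel + 1, n, out =>
      if n ≥ value then romanWhile value sym fuel (n - value) (out ++ [sym])
      else (n, out)

def to_roman_alt (n : Int) : String :=
  if n < 1 ∨ n > 20 then PySem.Int.toStr n
  else
    let st := [((10 : Int), "x"), (9, "ix"), (5, "v"), (4, "iv"), (1, "i")].foldl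
      (fun (st : Int × List String) p => romanWhile p.1 p.2 st.1.toNat st.1 st.2) (n, [])
    PySem.Str.join "" st.2

def generate_with_roman_alt (word : String) (max_n : Int) : List String :=
  (PySem.List.pyRange 1 (max_n + 1) 1).flatMap
    (fun i => [word ++ "_" ++ to_roman_alt i, word ++ to_roman_alt i])

-- ===== PRECONDITION & SPEC =====
def Spec_generate_with_roman (word : String) (max_n : Int) (out : List String) : Prop := out = generate_with_roman_alt word max_n
instance (word : String) (max_n : Int) (out : List String) : Decidable (Spec_generate_with_roman word max_n out) := by unfold Spec_generate_with_roman; infer_instance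

-- ===== CLAIM (what is proved, stated in full; the proofs are below) =====
def Claim_equal_generate_with_roman : Prop := ∀ (word : String) (max_n : Int), Dom_generate_with_roman word max_n → Spec_generate_with_roman word max_n (generate_with_roman word max_n)

-- ===== LEMMAS AND PROOFS =====

theorem to_roman_eq (n : Int) : to_roman n = to_roman_alt n := by
  by_cases h : n < 1 ∨ n > 20
  · simp [to_roman, to_roman_alt, h]
  · push_neg at h
    obtain ⟨h1, h2⟩ := h
    interval_cases n <;> decide

theorem foldl_two_eq_flatMap (f g : Int → String) (l : List Int) (acc : List String) :
    l.foldl (fun results i => results ++ [f i, g i]) acc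
      = acc ++ l.flatMap (fun i => [f i, g i]) := by
  induction l generalizing acc with
  | nil => simp
  | cons x xs ih => simp [List.foldl_cons, ih, List.flatMap_cons]

-- ===== VERDICT (by name: the statement is the Claim_ definition above) =====
theorem generate_with_roman_spec : Claim_equal_generate_with_roman := by
  intro word max_n _
  show _ = _
  unfold generate_with_roman generate_with_roman_alt
  simp only [to_roman_eq]
  rw [foldl_two_eq_flatMap]
  simp
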